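-- pv_equiv track=rewrite | github.com/JamesLeberknight/footbag-results | tools/51_build_side_by_side_inspector.py | build_raw_panel
-- ===== SOURCE A (Python) =====
-- from collections import defaultdict
--
-- def esc(s):
--     if not s:
--         return ""
--     return str(s).replace("&", "&amp;").replace("<", "&lt;").replace(">", "&gt;").replace('"', "&quot;")
--
-- def build_raw_panel(placements, canon_divisions_set):
--     """Returns (plain_text, html_str)"""
--     # Group by division
--     by_div = defaultdict(list)
--     for p in placements:
--         div = p.get("division", "") or "Unknown Division"
--         by_div[div].append(p)
--
--     # Sort divisions by first occurrence place
--     div_order = list(by_div.keys())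
--
--     lines_text = []
--     lines_html = []
--
--     for div in div_order:
--         entries = sorted(by_div[div], key=lambda x: (int(x.get("place", 999)) if str(x.get("place", "999")).isdigit() else 999))
--         n = len(entries)
--         header = f"{div} ({n} placement{'s' if n != 1 else ''})"
--
--         # Determine highlight class
--         if div in canon_divisions_set:
--             cls = "div-header shared"
--         else:
--             cls = "div-header raw-only"
--
--         lines_text.append(header)
--         lines_html.append(f'<span class="{cls}">{esc(header)}</span>')
--
--         for p in entries:
--             place = p.get("place", "?")
--             p1 = p.get("player1_name", "") or ""
--             p2 = p.get("player2_name", "") or ""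
--             if p2:
--                 name = f"{p1} / {p2}"
--             else:
--                 name = p1 or "[unknown]"
--             line = f"  {place}. {name}"
--             lines_text.append(line)
--             lines_html.append(esc(line))
--
--     plain = "\n".join(lines_text)
--     html = "\n".join(lines_html)
--     return plain, html
-- ===== SOURCE B (Python) =====
-- def esc(s):
--     if not s:
--         return ""
--     return str(s).replace("&", "&amp;").replace("<", "&lt;").replace(">", "&gt;").replace('"', "&quot;")
--
-- def build_raw_panel(placements, canon_divisions_set):
--     """Returns (plain_text, html_str): one global stable sort by (division first-occurrence
--     index, place key), then a single emit pass that starts a division on each boundary."""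
--     def div_of(p):
--         return p.get("division", "") or "Unknown Division"
--
--     def place_key(p):
--         s = str(p.get("place", "999"))
--         return int(s) if s.isdigit() else 999
--
--     div_names = [div_of(p) for p in placements]
--     order = []
--     for d in div_names:
--         if d not in order:
--             order.append(d)
--
--     ordered = sorted(placements, key=lambda p: (order.index(div_of(p)), place_key(p)))
--
--     text_lines, html_lines = [], []
--     prev = None
--     for p in ordered:
--         d = div_of(p)
--         if d != prev:
--             n = div_names.count(d)
--             header = f"{d} ({n} placement{'s' if n != 1 else ''})"
--             cls = "div-header shared" if d in canon_divisions_set else "div-header raw-only"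
--             text_lines.append(header)
--             html_lines.append(f'<span class="{cls}">{esc(header)}</span>')
--             prev = d
--         place = p.get("place", "?")
--         p1 = p.get("player1_name", "") or ""
--         p2 = p.get("player2_name", "") or ""
--         name = f"{p1} / {p2}" if p2 else (p1 or "[unknown]")
--         line = f"  {place}. {name}"
--         text_lines.append(line)
--         html_lines.append(esc(line))
--     return "\n".join(text_lines), "\n".join(html_lines)
-- ===== Notes on version B (the rewrite author's own statement) =====
-- stated objective: alternative
-- what changed: Replaces A's defaultdict grouping followed by a separate sort per division with one precomputed first-occurrence division order, a single stable global sort keyed by (division index, place key), and one boundary-detecting emit pass over the sorted list.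
import Mathlib
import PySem

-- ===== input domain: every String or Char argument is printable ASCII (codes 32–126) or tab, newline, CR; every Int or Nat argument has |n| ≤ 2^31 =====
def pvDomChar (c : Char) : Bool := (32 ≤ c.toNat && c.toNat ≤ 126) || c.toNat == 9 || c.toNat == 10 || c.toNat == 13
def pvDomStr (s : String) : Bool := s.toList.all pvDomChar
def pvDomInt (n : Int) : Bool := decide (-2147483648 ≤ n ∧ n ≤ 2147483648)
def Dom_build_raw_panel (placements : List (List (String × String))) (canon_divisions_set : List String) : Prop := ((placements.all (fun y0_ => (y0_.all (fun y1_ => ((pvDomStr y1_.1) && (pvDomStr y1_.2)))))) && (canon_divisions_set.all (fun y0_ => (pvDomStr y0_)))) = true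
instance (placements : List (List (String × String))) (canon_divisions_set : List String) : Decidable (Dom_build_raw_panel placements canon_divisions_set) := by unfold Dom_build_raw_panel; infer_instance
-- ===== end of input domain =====

-- B replaces A's dict-grouping + per-division sorts by ONE stable global sort keyed by
-- (first-occurrence index of the division, place key) followed by a single boundary-detecting
-- emit pass (objective: alternative decomposition, same asymptotic cost).

-- shared leaf helpers: literal transcriptions of expressions both Pythons compute identically
-- (esc and the f-string/lookup expressions of the module)
def pgetD (p : List (String × String)) (k dflt : String) : String :=
  match p.find? (fun q => q.1 == k) with
  | some q => q.2
  | none => dflt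

def divOf (p : List (String × String)) : String :=
  let d := pgetD p "division" ""
  if d = "" then "Unknown Division" else d

def placeKey (p : List (String × String)) : Int :=
  let s := pgetD p "place" "999"
  if PySem.Str.strIsdigit s then (PySem.Int.ofStr? s).getD 999 else 999

def escStr (s : String) : String :=
  if s = "" then "" else
    PySem.Str.replace (PySem.Str.replace (PySem.Str.replace (PySem.Str.replace s "&" "&amp;") "<" "&lt;") ">" "&gt;") "\"" "&quot;"

def nameOf (p : List (String × String)) : String :=
  let p1 := pgetD p "player1_name" ""
  let p2 := pgetD p "player2_name" ""
  if p2 ≠ "" then p1 ++ " / " ++ p2 else if p1 ≠ "" then p1 else "[unknown]"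

def lineOf (p : List (String × String)) : String :=
  "  " ++ pgetD p "place" "?" ++ ". " ++ nameOf p

def headerOf (d : String) (n : Int) : String :=
  d ++ " (" ++ PySem.Int.toStr n ++ " placement" ++ (if n ≠ 1 then "s" else "") ++ ")"

def clsOf (canon : List String) (d : String) : String :=
  if canon.contains d then "div-header shared" else "div-header raw-only"

def spanOf (cls header : String) : String :=
  "<span class=\"" ++ cls ++ "\">" ++ escStr header ++ "</span>"

-- ===== PORT A =====
def build_raw_panel (placements : List (List (String × String))) (canon_divisions_set : List String) : String × String :=
  let by_div : PySem.Dict String (List (List (String × String))) :=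
    placements.foldl (fun d p => d.modify (divOf p) [] (fun l => l ++ [p])) PySem.Dict.empty
  let div_order := by_div.keys
  let pair : List String × List String := div_order.foldl (fun acc div =>
    let entries := PySem.List.sorted (by_div.getD div []) placeKey false
    let n : Int := entries.length
    let header := headerOf div n
    let cls := clsOf canon_divisions_set div
    let acc1 := (acc.1 ++ [header], acc.2 ++ [spanOf cls header])
    entries.foldl (fun a p => (a.1 ++ [lineOf p], a.2 ++ [escStr (lineOf p)])) acc1) ([], [])
  (PySem.Str.join "\n" pair.1, PySem.Str.join "\n" pair.2)

-- ===== PORT B =====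
def build_raw_panel_alt (placements : List (List (String × String))) (canon_divisions_set : List String) : String × String :=
  let div_names := placements.map divOf
  let order := div_names.foldl (fun o d => if o.contains d then o else o ++ [d]) ([] : List String)
  let ordered := PySem.List.sorted2 placements (fun p => order.idxOf (divOf p)) placeKey false
  let res : List String × List String × Option String := ordered.foldl (fun acc p =>
    let d := divOf p
    let acc := if acc.2.2 ≠ some d then
        (acc.1 ++ [headerOf d (div_names.count d : Int)],
         acc.2.1 ++ [spanOf (clsOf canon_divisions_set d) (headerOf d (div_names.count d : Int))],
         some d)
      else acc
    (acc.1 ++ [lineOf p], acc.2.1 ++ [escStr (lineOf p)], acc.2.2)) (([], [], none))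
  (PySem.Str.join "\n" res.1, PySem.Str.join "\n" res.2.1)

-- ===== PRECONDITION & SPEC =====
def Spec_build_raw_panel (placements : List (List (String × String))) (canon_divisions_set : List String) (out : String × String) : Prop := out = build_raw_panel_alt placements canon_divisions_set
instance (placements : List (List (String × String))) (canon_divisions_set : List String) (out : String × String) : Decidable (Spec_build_raw_panel placements canon_divisions_set out) := by unfold Spec_build_raw_panel; infer_instance

-- ===== CLAIM (what is proved, stated in full; the proofs are below) =====
def Claim_equal_build_raw_panel : Prop := ∀ (placements : List (List (String × String))) (canon_divisions_set : List String), Dom_build_raw_panel placements canon_divisions_set → Spec_build_raw_panel placements canon_divisions_set (build_raw_panel placements canon_divisions_set)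

-- ===== LEMMAS AND PROOFS =====

-- abbreviations used only by the proofs
def Fdiv (placements : List (List (String × String))) (d : String) : List (List (String × String)) :=
  placements.filter (fun p => divOf p == d)

def Ediv (placements : List (List (String × String))) (d : String) : List (List (String × String)) :=
  PySem.List.sorted (Fdiv placements d) placeKey false

def Odiv (placements : List (List (String × String))) : List String :=
  PySem.Set.ofList (placements.map divOf)

def blockT (placements : List (List (String × String))) (d : String) : List String :=
  headerOf d ((Ediv placements d).length : Int) :: (Ediv placements d).map lineOf

def blockH (canon : List String) (placements : List (List (String × String))) (d : String) : List String :=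
  spanOf (clsOf canon d) (headerOf d ((Ediv placements d).length : Int))
    :: (Ediv placements d).map (fun p => escStr (lineOf p))


def lexBef (O : List String) (a b : List (String × String)) : Bool :=
  decide (List.idxOf (divOf a) O < List.idxOf (divOf b) O) ||
    (!decide (List.idxOf (divOf b) O < List.idxOf (divOf a) O) && decide (placeKey a < placeKey b))

-- ---- generic insertBy facts ----
theorem insertBy_congr {α : Type} (b b' : α → α → Bool) (x : α) (ys : List α)
    (h : ∀ y ∈ ys, b x y = b' x y) :
    PySem.List.insertBy b x ys = PySem.List.insertBy b' x ys := by
  induction ys with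
  | nil => rfl
  | cons y t ih =>
    simp only [PySem.List.insertBy]
    rw [h y (by simp)]
    split
    · rfl
    · rw [ih (fun z hz => h z (by simp [hz]))]

theorem insertBy_prefix_skip {α : Type} (b : α → α → Bool) (x : α) (A R : List α)
    (hA : ∀ a ∈ A, b x a = false) :
    PySem.List.insertBy b x (A ++ R) = A ++ PySem.List.insertBy b x R := by
  induction A with
  | nil => rfl
  | cons a t ih =>
    simp only [List.cons_append, PySem.List.insertBy]
    rw [hA a (by simp)]
    simp only [Bool.false_eq_true, if_false]
    rw [ih (fun z hz => hA z (by simp [hz]))]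

theorem insertBy_suffix_keep {α : Type} (b : α → α → Bool) (x : α) (B C : List α)
    (hC : ∀ c ∈ C, b x c = true) :
    PySem.List.insertBy b x (B ++ C) = PySem.List.insertBy b x B ++ C := by
  induction B with
  | nil =>
    cases C with
    | nil => rfl
    | cons c t =>
      simp only [List.nil_append, PySem.List.insertBy]
      rw [hC c (by simp)]
      rfl
  | cons y t ih =>
    simp only [List.cons_append, PySem.List.insertBy]
    split
    · rfl
    · rw [ih]; simp

theorem foldl_insertBy_congr {α : Type} (P : α → Prop) (b b' : α → α → Bool)
    (hb : ∀ u v, P u → P v → b u v = b' u v) :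
    ∀ (zs acc : List α), (∀ z ∈ zs, P z) → (∀ y ∈ acc, P y) →
      zs.foldl (fun acc x => PySem.List.insertBy b x acc) acc
        = zs.foldl (fun acc x => PySem.List.insertBy b' x acc) acc := by
  intro zs
  induction zs with
  | nil => intro acc _ _; rfl
  | cons z t ih =>
    intro acc hz hacc
    simp only [List.foldl_cons]
    rw [insertBy_congr b b' z acc (fun y hy => hb z y (hz z (by simp)) (hacc y hy))]
    exact ih _ (fun w hw => hz w (by simp [hw]))
      (fun y hy => by
        rcases (PySem.List.mem_insertBy _ _ _ _).1 hy with h | h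
        · exact h ▸ hz z (by simp)
        · exact hacc y h)

-- ---- facts about the division decomposition ----
theorem mem_Odiv (ys : List (List (String × String))) (d : String) :
    d ∈ Odiv ys ↔ d ∈ ys.map divOf := PySem.Set.mem_ofList _ _

theorem divOf_of_mem_Ediv {ys : List (List (String × String))} {d : String} {p : List (String × String)}
    (h : p ∈ Ediv ys d) : divOf p = d := by
  have := (PySem.List.mem_sorted _ _ _ _).1 h
  exact eq_of_beq (List.mem_filter.mp this).2

theorem Ediv_ne_nil {ys : List (List (String × String))} {d : String} (h : d ∈ Odiv ys) :
    Ediv ys d ≠ [] := by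
  intro hnil
  rw [Ediv, PySem.List.sorted_eq_nil_iff] at hnil
  rcases List.mem_map.1 ((mem_Odiv ys d).1 h) with ⟨p, hp, hdp⟩
  have : p ∈ Fdiv ys d := List.mem_filter.2 ⟨hp, by simp [hdp]⟩
  simp [hnil] at this

theorem Fdiv_append_singleton (ys : List (List (String × String))) (x : List (String × String)) (d : String) :
    Fdiv (ys ++ [x]) d = Fdiv ys d ++ (if divOf x = d then [x] else []) := by
  rw [Fdiv, List.filter_append]
  congr 1
  by_cases hd : divOf x = d <;> simp [hd]

theorem Ediv_append_of_ne {x : List (String × String)} {d : String} (ys : List (List (String × String)))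
    (h : divOf x ≠ d) : Ediv (ys ++ [x]) d = Ediv ys d := by
  rw [Ediv, Ediv, Fdiv_append_singleton]
  simp [h]

theorem Ediv_append_self (ys : List (List (String × String))) (x : List (String × String)) :
    Ediv (ys ++ [x]) (divOf x)
      = PySem.List.insertBy (fun a b => decide (placeKey a < placeKey b)) x (Ediv ys (divOf x)) := by
  rw [Ediv, Ediv, Fdiv_append_singleton]
  simp only []
  rw [PySem.List.sorted_eq_foldl_insertBy, PySem.List.sorted_eq_foldl_insertBy, List.foldl_append]
  rfl

theorem Odiv_append_singleton (ys : List (List (String × String))) (x : List (String × String)) :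
    Odiv (ys ++ [x]) = if divOf x ∈ Odiv ys then Odiv ys else Odiv ys ++ [divOf x] := by
  rw [Odiv, Odiv, List.map_append, PySem.Set.ofList_eq_foldl, PySem.Set.ofList_eq_foldl,
    List.foldl_append]
  simp only [List.map_cons, List.map_nil, List.foldl_cons, List.foldl_nil]
  rw [show PySem.Set.add (List.foldl PySem.Set.add [] (List.map divOf ys)) (divOf x)
      = if (List.foldl PySem.Set.add [] (List.map divOf ys)).contains (divOf x) = true
        then List.foldl PySem.Set.add [] (List.map divOf ys)
        else List.foldl PySem.Set.add [] (List.map divOf ys) ++ [divOf x] from rfl]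
  rw [← PySem.Set.ofList_eq_foldl]
  by_cases hx : divOf x ∈ PySem.Set.ofList (List.map divOf ys) <;>
    simp [hx]

-- ---- the single global stable sort equals the concatenation of the per-division sorts ----
theorem sorted2_flatMap (ps : List (List (String × String))) :
    ps.foldl (fun acc x => PySem.List.insertBy (lexBef (Odiv ps)) x acc) []
      = (Odiv ps).flatMap (Ediv ps) := by
  induction ps using List.reverseRecOn with
  | nil => simp [Odiv, PySem.Set.ofList]
  | append_singleton ys x ih =>
    rw [List.foldl_append, List.foldl_cons, List.foldl_nil]
    by_cases hx : divOf x ∈ Odiv ys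
    · -- the division of x was seen before: x is inserted inside its block
      have hO : Odiv (ys ++ [x]) = Odiv ys := by rw [Odiv_append_singleton]; simp [hx]
      rw [hO, ih]
      obtain ⟨O1, O2, hsplit⟩ := List.append_of_mem hx
      have hnd : (Odiv ys).Nodup := PySem.Set.nodup_ofList _
      rw [hsplit] at hnd
      have hdx1 : divOf x ∉ O1 := by
        intro h; exact (List.disjoint_of_nodup_append hnd) h (by simp)
      have hdx2 : divOf x ∉ O2 := by
        have := (List.nodup_append.1 hnd).2.1
        simp [List.nodup_cons] at this
        exact this.1
      have hidx_dx : List.idxOf (divOf x) (O1 ++ divOf x :: O2) = O1.length := by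
        rw [List.idxOf_append]
        simp [hdx1]
      have hidx_O1 : ∀ d' ∈ O1, List.idxOf d' (O1 ++ divOf x :: O2) < O1.length := by
        intro d' hd'
        rw [List.idxOf_append, if_pos hd']
        exact List.idxOf_lt_length_iff.2 hd'
      have hidx_O2 : ∀ d' ∈ O2, O1.length < List.idxOf d' (O1 ++ divOf x :: O2) := by
        intro d' hd'
        have hne : d' ∉ O1 := by
          intro h; exact (List.disjoint_of_nodup_append hnd) h (by simp [hd'])
        have hnedx : divOf x ≠ d' := fun h => hdx2 (h ▸ hd')
        rw [List.idxOf_append, if_neg hne, List.idxOf_cons_ne _ (by simpa using hnedx)]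
        omega
      rw [hsplit, List.flatMap_append, List.flatMap_cons]
      have hskip : ∀ a ∈ O1.flatMap (Ediv ys), lexBef (O1 ++ divOf x :: O2) x a = false := by
        intro a ha
        rcases List.mem_flatMap.1 ha with ⟨d', hd', hae⟩
        have hda : divOf a = d' := divOf_of_mem_Ediv hae
        have h1 := hidx_O1 d' hd'
        simp only [lexBef, hda, hidx_dx]
        have hn1 : ¬ (O1.length < List.idxOf d' (O1 ++ divOf x :: O2)) := by omega
        simp [hn1, Nat.lt_of_lt_of_le h1 (le_refl _)]
      have hkeep : ∀ c ∈ O2.flatMap (Ediv ys), lexBef (O1 ++ divOf x :: O2) x c = true := by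
        intro c hc
        rcases List.mem_flatMap.1 hc with ⟨d', hd', hce⟩
        have hdc : divOf c = d' := divOf_of_mem_Ediv hce
        simp only [lexBef, hdc, hidx_dx]
        simp [hidx_O2 d' hd']
      rw [insertBy_prefix_skip _ _ _ _ hskip, insertBy_suffix_keep _ _ _ _ hkeep]
      have hmid : PySem.List.insertBy (lexBef (O1 ++ divOf x :: O2)) x (Ediv ys (divOf x))
          = PySem.List.insertBy (fun a b => decide (placeKey a < placeKey b)) x (Ediv ys (divOf x)) := by
        apply insertBy_congr
        intro y hy
        have hdy : divOf y = divOf x := divOf_of_mem_Ediv hy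
        simp [lexBef, hdy]
      rw [hmid, ← Ediv_append_self]
      have hO1 : O1.flatMap (Ediv ys) = O1.flatMap (Ediv (ys ++ [x])) :=
        List.flatMap_congr (fun d' hd' => (Ediv_append_of_ne ys (fun h => hdx1 (h ▸ hd'))).symm)
      have hO2 : O2.flatMap (Ediv ys) = O2.flatMap (Ediv (ys ++ [x])) :=
        List.flatMap_congr (fun d' hd' => (Ediv_append_of_ne ys (fun h => hdx2 (h ▸ hd'))).symm)
      rw [hO1, hO2, List.flatMap_append, List.flatMap_cons]
    · -- a new division: x goes to the very end, as a new block
      have hO : Odiv (ys ++ [x]) = Odiv ys ++ [divOf x] := by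
        rw [Odiv_append_singleton]; simp [hx]
      have hcong : ys.foldl (fun acc p => PySem.List.insertBy (lexBef (Odiv (ys ++ [x]))) p acc) []
          = ys.foldl (fun acc p => PySem.List.insertBy (lexBef (Odiv ys)) p acc) [] := by
        apply foldl_insertBy_congr (fun p => p ∈ ys)
        · intro u v hu hv
          have hmu : divOf u ∈ Odiv ys := (mem_Odiv _ _).2 (List.mem_map_of_mem hu)
          have hmv : divOf v ∈ Odiv ys := (mem_Odiv _ _).2 (List.mem_map_of_mem hv)
          simp only [lexBef, hO, List.idxOf_append, if_pos hmu, if_pos hmv]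
        · exact fun z hz => hz
        · simp
      rw [hcong, ih]
      have hxs : ∀ a ∈ (Odiv ys).flatMap (Ediv ys), lexBef (Odiv (ys ++ [x])) x a = false := by
        intro a ha
        rcases List.mem_flatMap.1 ha with ⟨d', hd', hae⟩
        have hda : divOf a = d' := divOf_of_mem_Ediv hae
        have h1 : List.idxOf d' (Odiv (ys ++ [x])) < (Odiv ys).length := by
          rw [hO, List.idxOf_append, if_pos hd']
          exact List.idxOf_lt_length_iff.2 hd'
        have h2 : List.idxOf (divOf x) (Odiv (ys ++ [x])) = (Odiv ys).length := by
          rw [hO, List.idxOf_append, if_neg hx]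
          simp
        simp only [lexBef, hda, h2]
        have hn1 : ¬ ((Odiv ys).length < List.idxOf d' (Odiv (ys ++ [x]))) := by omega
        simp [hn1, h1]
      rw [PySem.List.insertBy_of_forall_not_before _ _ _ hxs, hO, List.flatMap_append,
        List.flatMap_cons, List.flatMap_nil]
      have hFnil : Fdiv ys (divOf x) = [] := by
        rw [Fdiv, List.filter_eq_nil_iff]
        intro p hp
        simp only [beq_iff_eq]
        intro h
        exact hx ((mem_Odiv _ _).2 (h ▸ List.mem_map_of_mem hp))
      have hEx : Ediv (ys ++ [x]) (divOf x) = [x] := by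
        rw [Ediv, Fdiv_append_singleton, hFnil, if_pos rfl]
        rfl
      have hOy : (Odiv ys).flatMap (Ediv ys) = (Odiv ys).flatMap (Ediv (ys ++ [x])) := by
        apply List.flatMap_congr
        intro d' hd'
        exact (Ediv_append_of_ne ys (fun h => hx (h ▸ hd'))).symm
      rw [hEx, ← hOy]
      simp

-- ---- characterization of port A ----
theorem A_characterization (placements : List (List (String × String))) (canon : List String) :
    build_raw_panel placements canon =
      (PySem.Str.join "\n" ((Odiv placements).flatMap (blockT placements)),
       PySem.Str.join "\n" ((Odiv placements).flatMap (blockH canon placements))) := by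
  have hgroup : ∀ c, (placements.foldl (fun d p => d.modify (divOf p) [] (fun l => l ++ [p]))
      PySem.Dict.empty).getD c [] = Fdiv placements c := by
    intro c
    rw [show (placements.foldl (fun d p => d.modify (divOf p) [] (fun l => l ++ [p])) PySem.Dict.empty)
        = ((placements.map (fun p => (divOf p, p))).foldl
            (fun d q => d.modify q.1 [] (fun l => l ++ [q.2])) PySem.Dict.empty) from
      (List.foldl_map).symm ▸ rfl]
    rw [PySem.Dict.getD_foldl_modify_append]
    simp [PySem.Dict.getD_empty, List.filter_map, Function.comp_def, Fdiv, List.map_map]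
  have hkeys : (placements.foldl (fun d p => d.modify (divOf p) [] (fun l => l ++ [p]))
      PySem.Dict.empty).keys = Odiv placements := by
    have h := PySem.Dict.keys_foldl_modify_key placements divOf ([] : List (List (String × String)))
      (fun _ p l => l ++ [p]) PySem.Dict.empty
    simp only [PySem.Dict.keys_empty] at h
    exact h.trans rfl
  unfold build_raw_panel
  dsimp only
  rw [hkeys]
  have hfun : (fun (acc : List String × List String) div =>
      (PySem.List.sorted ((placements.foldl (fun d p => d.modify (divOf p) [] (fun l => l ++ [p]))
          PySem.Dict.empty).getD div []) placeKey false).foldl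
        (fun a p => (a.1 ++ [lineOf p], a.2 ++ [escStr (lineOf p)]))
        (acc.1 ++ [headerOf div ((PySem.List.sorted ((placements.foldl (fun d p => d.modify (divOf p) [] (fun l => l ++ [p])) PySem.Dict.empty).getD div []) placeKey false).length : Int)],
         acc.2 ++ [spanOf (clsOf canon div) (headerOf div ((PySem.List.sorted ((placements.foldl (fun d p => d.modify (divOf p) [] (fun l => l ++ [p])) PySem.Dict.empty).getD div []) placeKey false).length : Int))]))
      = (fun acc div => (acc.1 ++ blockT placements div, acc.2 ++ blockH canon placements div)) := by
    funext acc div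
    rw [hgroup div]
    rw [PySem.List.foldl_prod_mk (f := fun l p => l ++ [lineOf p])
      (g := fun l p => l ++ [escStr (lineOf p)])]
    rw [PySem.List.foldl_append_singleton_eq_map, PySem.List.foldl_append_singleton_eq_map]
    simp [blockT, blockH, Ediv]
  rw [hfun]
  rw [PySem.List.foldl_prod_mk (f := fun l div => l ++ blockT placements div)
    (g := fun l div => l ++ blockH canon placements div)]
  rw [PySem.List.foldl_append_eq_flatMap, PySem.List.foldl_append_eq_flatMap]
  simp

-- ---- the emit pass of B over the concatenated blocks ----
def stepEmit (H1 H2 : String → String) (acc : List String × List String × Option String)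
    (p : List (String × String)) : List String × List String × Option String :=
  let d := divOf p
  let acc' := if acc.2.2 ≠ some d then (acc.1 ++ [H1 d], acc.2.1 ++ [H2 d], some d) else acc
  (acc'.1 ++ [lineOf p], acc'.2.1 ++ [escStr (lineOf p)], acc'.2.2)

theorem emit_rest (H1 H2 : String → String) (d : String) :
    ∀ (es : List (List (String × String))) (t h : List String), (∀ p ∈ es, divOf p = d) →
      es.foldl (stepEmit H1 H2) (t, h, some d)
        = (t ++ es.map lineOf, h ++ es.map (fun p => escStr (lineOf p)), some d) := by
  intro es
  induction es with
  | nil => intro t h _; simp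
  | cons e es ih =>
    intro t h hdiv
    have hd : divOf e = d := hdiv e (by simp)
    rw [List.foldl_cons, show stepEmit H1 H2 (t, h, some d) e
        = (t ++ [lineOf e], h ++ [escStr (lineOf e)], some d) from by simp [stepEmit, hd]]
    rw [ih _ _ (fun p hp => hdiv p (by simp [hp]))]
    simp

theorem emit_block (H1 H2 : String → String) (d : String) (es : List (List (String × String)))
    (t h : List String) (prev : Option String) (hne : es ≠ []) (hdiv : ∀ p ∈ es, divOf p = d)
    (hprev : prev ≠ some d) :
    es.foldl (stepEmit H1 H2) (t, h, prev)
      = (t ++ H1 d :: es.map lineOf, h ++ H2 d :: es.map (fun p => escStr (lineOf p)), some d) := by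
  cases es with
  | nil => exact absurd rfl hne
  | cons e es =>
    have hd : divOf e = d := hdiv e (by simp)
    rw [List.foldl_cons, show stepEmit H1 H2 (t, h, prev) e
        = ((t ++ [H1 d]) ++ [lineOf e], (h ++ [H2 d]) ++ [escStr (lineOf e)], some d) from by
      simp [stepEmit, hd, hprev]]
    rw [emit_rest H1 H2 d es _ _ (fun p hp => hdiv p (by simp [hp]))]
    simp

theorem emit_blocks (H1 H2 : String → String) (E : String → List (List (String × String))) :
    ∀ (ds : List String) (t h : List String) (prev : Option String), ds.Nodup →
      (∀ d ∈ ds, E d ≠ [] ∧ ∀ p ∈ E d, divOf p = d) → (∀ d ∈ ds, prev ≠ some d) →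
      ∃ pr, (ds.flatMap E).foldl (stepEmit H1 H2) (t, h, prev)
        = (t ++ ds.flatMap (fun d => H1 d :: (E d).map lineOf),
           h ++ ds.flatMap (fun d => H2 d :: (E d).map (fun p => escStr (lineOf p))), pr) := by
  intro ds
  induction ds with
  | nil => intro t h prev _ _ _; exact ⟨prev, by simp⟩
  | cons d ds ih =>
    intro t h prev hnd hbl hprev
    rw [List.flatMap_cons, List.foldl_append]
    rw [emit_block H1 H2 d (E d) t h prev (hbl d (by simp)).1 (hbl d (by simp)).2
      (hprev d (by simp))]
    have hnotmem : d ∉ ds := (List.nodup_cons.1 hnd).1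
    obtain ⟨pr, hpr⟩ := ih _ _ (some d) (List.nodup_cons.1 hnd).2
      (fun d' hd' => hbl d' (by simp [hd']))
      (fun d' hd' => by simp; intro hdd; exact hnotmem (hdd ▸ hd'))
    refine ⟨pr, ?_⟩
    rw [hpr]
    simp

theorem count_div (ys : List (List (String × String))) (d : String) :
    (ys.map divOf).count d = (Ediv ys d).length := by
  rw [Ediv, PySem.List.length_sorted, Fdiv, List.count_eq_countP, List.countP_map,
    List.countP_eq_length_filter]
  rfl

-- ---- characterization of port B ----
theorem B_characterization (placements : List (List (String × String))) (canon : List String) :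
    build_raw_panel_alt placements canon =
      (PySem.Str.join "\n" ((Odiv placements).flatMap (blockT placements)),
       PySem.Str.join "\n" ((Odiv placements).flatMap (blockH canon placements))) := by
  unfold build_raw_panel_alt
  dsimp only
  rw [show ((placements.map divOf).foldl (fun o d => if o.contains d then o else o ++ [d])
      ([] : List String)) = Odiv placements from rfl]
  rw [show PySem.List.sorted2 placements (fun p => (Odiv placements).idxOf (divOf p)) placeKey false
      = placements.foldl (fun acc x => PySem.List.insertBy (lexBef (Odiv placements)) x acc) []
    from rfl]
  rw [sorted2_flatMap]
  rw [show (fun (acc : List String × List String × Option String) p =>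
      let d := divOf p;
      let acc := if acc.2.2 ≠ some d then
          (acc.1 ++ [headerOf d ((placements.map divOf).count d : Int)],
           acc.2.1 ++ [spanOf (clsOf canon d) (headerOf d ((placements.map divOf).count d : Int))],
           some d)
        else acc;
      (acc.1 ++ [lineOf p], acc.2.1 ++ [escStr (lineOf p)], acc.2.2))
    = stepEmit (fun d => headerOf d ((placements.map divOf).count d : Int))
        (fun d => spanOf (clsOf canon d) (headerOf d ((placements.map divOf).count d : Int)))
    from rfl]
  obtain ⟨pr, hpr⟩ := emit_blocks
    (fun d => headerOf d ((placements.map divOf).count d : Int))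
    (fun d => spanOf (clsOf canon d) (headerOf d ((placements.map divOf).count d : Int)))
    (Ediv placements) (Odiv placements) [] [] none (PySem.Set.nodup_ofList _)
    (fun d hd => ⟨Ediv_ne_nil hd, fun p hp => divOf_of_mem_Ediv hp⟩)
    (fun d _ => by simp)
  rw [hpr]
  have hbt : (fun d => headerOf d ((placements.map divOf).count d : Int)
        :: (Ediv placements d).map lineOf) = blockT placements := by
    funext d
    rw [count_div]
    rfl
  have hbh : (fun d => spanOf (clsOf canon d) (headerOf d ((placements.map divOf).count d : Int))
        :: (Ediv placements d).map (fun p => escStr (lineOf p))) = blockH canon placements := by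
    funext d
    rw [count_div]
    rfl
  rw [hbt, hbh]
  simp

-- ===== VERDICT (by name: the statement is the Claim_ definition above) =====
theorem build_raw_panel_spec : Claim_equal_build_raw_panel := by
  intro placements canon _
  unfold Spec_build_raw_panel
  rw [A_characterization, B_characterization]
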